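-- pv_equiv track=rewrite | github.com/JaydenPahukula/competitive-coding | Codeforces/855/F.py | isNightmare
-- ===== SOURCE A (Python) =====
-- from collections import defaultdict
--
-- def isNightmare(s1:str, s2:str):
--     if len(s1) + len(s2) < 25: return False
--     if len(set(s1+s2)) != 25: return False
--     d = defaultdict(lambda: 0)
--     for c in s1:
--         d[c] += 1
--     for c in s2:
--         d[c] += 1
--     for letter in d:
--         if d[letter]%2 == 0: return False
--     return True
-- ===== SOURCE B (Python) =====
-- def isNightmare(s1: str, s2: str):
--     # Sort the combined string and run-length scan it: exactly 25 runs, all odd.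
--     t = sorted(s1 + s2)
--     n = len(t)
--     runs = 0
--     ok = True
--     i = 0
--     while i < n:
--         j = i
--         while j < n and t[j] == t[i]:
--             j += 1
--         runs += 1
--         if (j - i) % 2 == 0:
--             ok = False
--         i = j
--     return runs == 25 and ok
-- ===== Notes on version B (the rewrite author's own statement) =====
-- stated objective: alternative
-- what changed: Replaces set-size check plus defaultdict counting plus dict scan by a single sort-then-run-length scan: sort s1+s2 and count consecutive equal-character runs, returning True iff there are exactly 25 runs all of odd length (the length>=25 guard is subsumed since run count is at most the total length).
import Mathlib
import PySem

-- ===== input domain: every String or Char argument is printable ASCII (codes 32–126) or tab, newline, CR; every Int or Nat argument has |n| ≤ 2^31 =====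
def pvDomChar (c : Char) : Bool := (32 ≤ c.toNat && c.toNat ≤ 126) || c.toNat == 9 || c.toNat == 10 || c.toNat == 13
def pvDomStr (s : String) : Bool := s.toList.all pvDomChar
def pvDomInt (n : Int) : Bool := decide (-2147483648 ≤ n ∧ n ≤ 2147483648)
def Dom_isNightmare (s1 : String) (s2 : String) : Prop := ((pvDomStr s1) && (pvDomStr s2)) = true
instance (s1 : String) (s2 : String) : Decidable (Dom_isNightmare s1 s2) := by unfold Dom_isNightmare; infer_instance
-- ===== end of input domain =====

-- B replaces hash-counting by a sort-then-run-length scan (alternative decomposition, not claimed faster).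

-- ===== PORT A =====
def isNightmare (s1 : String) (s2 : String) : Bool :=
  let l1 := s1.toList
  let l2 := s2.toList
  if l1.length + l2.length < 25 then false
  else if (PySem.Set.ofList (l1 ++ l2)).length ≠ 25 then false
  else
    let d := l1.foldl (fun d c => d.modify c 0 (· + 1)) (PySem.Dict.empty : PySem.Dict Char Int)
    let d := l2.foldl (fun d c => d.modify c 0 (· + 1)) d
    -- 'for letter in d: if d[letter]%2==0: return False / return True'
    d.keys.all (fun c => !(PySem.Int.mod (d.getD c 0) 2 == 0))

-- ===== PORT B =====
-- the outer while loop of Source B: each step consumes one run (the inner while loop = takeWhile)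
def pvRunScan : List Char → Nat → Bool → Nat × Bool
  | [], runs, ok => (runs, ok)
  | c :: rest, runs, ok =>
      let run := rest.takeWhile (· == c)
      pvRunScan (rest.dropWhile (· == c)) (runs + 1)
        (if (run.length + 1) % 2 == 0 then false else ok)
termination_by t _ _ => t.length
decreasing_by
  simpa using Nat.lt_succ_of_le (List.length_dropWhile_le _ _)

def isNightmare_alt (s1 : String) (s2 : String) : Bool :=
  let t := PySem.List.sorted (s1.toList ++ s2.toList) (fun x => x) false
  let r := pvRunScan t 0 true
  decide (r.1 = 25) && r.2

-- ===== PRECONDITION & SPEC =====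
def Spec_isNightmare (s1 : String) (s2 : String) (out : Bool) : Prop := out = isNightmare_alt s1 s2
instance (s1 : String) (s2 : String) (out : Bool) : Decidable (Spec_isNightmare s1 s2 out) := by unfold Spec_isNightmare; infer_instance

-- ===== CLAIM (what is proved, stated in full; the proofs are below) =====
def Claim_equal_isNightmare : Prop := ∀ (s1 : String) (s2 : String), Dom_isNightmare s1 s2 → Spec_isNightmare s1 s2 (isNightmare s1 s2)

-- ===== LEMMAS AND PROOFS =====

def pvAllOdd (t : List Char) : Bool := t.all (fun x => decide (t.count x % 2 = 1))

-- |set(xs)| is the number of distinct elements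
theorem pvOfList_length (xs : List Char) : (PySem.Set.ofList xs).length = xs.toFinset.card := by
  rw [← List.toFinset_card_of_nodup (PySem.Set.nodup_ofList xs)]
  congr 1
  ext x
  simp [PySem.Set.mem_ofList]

-- elements surviving dropWhile (== c) in a list bounded below by c are > c
theorem pvDropWhile_gt (c : Char) :
    ∀ (t : List Char), (∀ y ∈ t, c ≤ y) → t.Pairwise (· ≤ ·) →
      ∀ x ∈ t.dropWhile (fun y => y == c), c < x := by
  intro t
  induction t with
  | nil => intro _ _ x hx; simp [List.dropWhile] at hx
  | cons a t' ih =>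
    intro hall hp x hx
    rw [List.dropWhile] at hx
    by_cases hac : a = c
    · subst hac
      simp only [beq_self_eq_true] at hx
      exact ih (fun y hy => hall y (List.mem_cons_of_mem _ hy)) hp.of_cons x hx
    · have hbe : (a == c) = false := by simp [hac]
      rw [hbe] at hx
      have hca : c < a := lt_of_le_of_ne (hall a (List.mem_cons_self)) (fun h => hac h.symm)
      rcases List.mem_cons.mp hx with h | h
      · exact h ▸ hca
      · exact lt_of_lt_of_le hca ((List.pairwise_cons.mp hp).1 x h)

-- one run-length step splits off exactly one distinct character and its parity
theorem pvAllOdd_cons (c : Char) (rest : List Char) (hp : (c :: rest).Pairwise (· ≤ ·)) :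
    pvAllOdd (c :: rest)
      = (decide (((rest.takeWhile (· == c)).length + 1) % 2 = 1)
          && pvAllOdd (rest.dropWhile (· == c))) := by
  set run := rest.takeWhile (· == c) with hrun
  set rest' := rest.dropWhile (· == c) with hrest'
  have h1 : ∀ x ∈ run, x = c := by
    intro x hx
    have := List.mem_takeWhile_imp hx
    simpa using this.symm
  have hall : ∀ y ∈ rest, c ≤ y := (List.pairwise_cons.mp hp).1
  have h2 : ∀ x ∈ rest', c < x := pvDropWhile_gt c rest hall hp.of_cons
  have hsplit : run ++ rest' = rest := List.takeWhile_append_dropWhile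
  have hcnotin : c ∉ rest' := fun h => lt_irrefl c (h2 c h)
  have hcrun : run.count c = run.length := by
    rw [List.count_eq_length]
    intro b hb
    simpa using (h1 b hb).symm
  have hc : (c :: rest).count c = run.length + 1 := by
    rw [← hsplit]
    simp [List.count_append, hcrun, List.count_eq_zero.mpr hcnotin]
  have hx : ∀ x ∈ rest', (c :: rest).count x = rest'.count x := by
    intro x hxm
    have hxc : x ≠ c := fun h => lt_irrefl c (h ▸ h2 x hxm)
    have hxrun : run.count x = 0 := List.count_eq_zero.mpr (fun h => hxc (h1 x h))
    rw [← hsplit]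
    simp [List.count_cons, List.count_append, hxrun]
    exact fun h => hxc h.symm
  apply Bool.eq_iff_iff.mpr
  simp only [pvAllOdd, List.all_eq_true, Bool.and_eq_true, decide_eq_true_eq]
  constructor
  · intro hA
    refine ⟨by rw [← hc]; exact hA c List.mem_cons_self, ?_⟩
    intro x hxm
    rw [← hx x hxm]
    exact hA x (by rw [← hsplit] at *; exact List.mem_cons_of_mem _ (List.mem_append_right _ hxm))
  · rintro ⟨hodd, hB⟩ x hxm
    rw [← hsplit] at hxm
    rcases List.mem_cons.mp hxm with h | h
    · subst h; rw [hc]; exact hodd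
    · rcases List.mem_append.mp h with h | h
      · rw [h1 x h, hc]; exact hodd
      · rw [hx x h]; exact hB x h

theorem pvRunScan_sorted :
    ∀ (t : List Char) (runs : Nat) (ok : Bool), t.Pairwise (· ≤ ·) →
      pvRunScan t runs ok = (runs + t.toFinset.card, ok && pvAllOdd t) := by
  intro t runs ok
  induction t, runs, ok using pvRunScan.induct with
  | case1 runs ok =>
    intro _
    simp [pvRunScan, pvAllOdd]
  | case2 c rest runs ok run ih =>
    intro hp
    set rest' := rest.dropWhile (· == c) with hrest'
    have hall : ∀ y ∈ rest, c ≤ y := (List.pairwise_cons.mp hp).1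
    have h2 : ∀ x ∈ rest', c < x := pvDropWhile_gt c rest hall hp.of_cons
    have hpair' : rest'.Pairwise (· ≤ ·) := hp.of_cons.sublist (List.dropWhile_sublist _)
    have hsplit : run ++ rest' = rest := List.takeWhile_append_dropWhile
    have hcard : (c :: rest).toFinset.card = 1 + rest'.toFinset.card := by
      have hset : (c :: rest).toFinset = insert c rest'.toFinset := by
        ext x
        simp only [List.mem_toFinset, List.mem_cons, Finset.mem_insert, ← hsplit,
          List.mem_append]
        constructor
        · rintro (h | h | h)
          · exact Or.inl h
          · exact Or.inl (by
              have := List.mem_takeWhile_imp h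
              simpa using this)
          · exact Or.inr h
        · rintro (h | h)
          · exact Or.inl h
          · exact Or.inr (Or.inr h)
      rw [hset, Finset.card_insert_of_notMem (by
        simp only [List.mem_toFinset]
        exact fun h => lt_irrefl c (h2 c h)), Nat.add_comm]
    rw [pvRunScan]
    show pvRunScan rest' (runs + 1) (if ((run.length + 1) % 2 == 0) = true then false else ok)
      = (runs + (c :: rest).toFinset.card, ok && pvAllOdd (c :: rest))
    simp only [dite_eq_ite] at ih
    rw [ih hpair', pvAllOdd_cons c rest hp, hcard]
    refine Prod.ext ?_ ?_
    · simp; omega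
    · show ((if ((run.length + 1) % 2 == 0) = true then false else ok) && pvAllOdd rest')
        = (ok && (decide ((run.length + 1) % 2 = 1) && pvAllOdd rest'))
      rcases Nat.mod_two_eq_zero_or_one (run.length + 1) with hpar | hpar
      · simp [hpar]
      · simp [hpar]

-- the Int-mod test of port A over a Nat count
theorem pvMod2 (n : Nat) : (PySem.Int.mod (n : Int) 2 == 0) = decide (n % 2 = 0) := by
  unfold PySem.Int.mod
  rw [Int.fmod_eq_emod]
  simp
  have h : (n : Int) % 2 = ((n % 2 : Nat) : Int) := by omega
  rw [h]
  rcases Nat.mod_two_eq_zero_or_one n with h2 | h2 <;> simp [h2]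

theorem isNightmare_spec : Claim_equal_isNightmare := by
  intro s1 s2 _
  unfold Spec_isNightmare isNightmare isNightmare_alt
  simp only []
  set l : List Char := s1.toList ++ s2.toList with hl
  have hfold : (s2.toList).foldl (fun d c => d.modify c 0 (· + 1))
      ((s1.toList).foldl (fun d c => d.modify c 0 (· + 1)) (PySem.Dict.empty : PySem.Dict Char Int))
      = PySem.Dict.counter l := by
    rw [PySem.Dict.counter_eq_foldl, hl, List.foldl_append]
  set t : List Char := PySem.List.sorted l (fun x => x) false with hts
  have hperm : t.Perm l := PySem.List.sorted_perm l _ _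
  have hpair : t.Pairwise (· ≤ ·) := PySem.List.sorted_pairwise l (fun x => x)
  have hrun := pvRunScan_sorted t 0 true hpair
  have htf : t.toFinset = l.toFinset := List.toFinset_eq_of_perm t l hperm
  have hlen : t.length = l.length := hperm.length_eq
  rw [hrun]
  simp only [Bool.true_and, Nat.zero_add]
  by_cases h25 : s1.toList.length + s2.toList.length < 25
  · -- A returns false; B's run count < 25
    rw [if_pos h25]
    have hcard : t.toFinset.card < 25 := by
      calc t.toFinset.card ≤ t.length := t.toFinset_card_le
        _ < 25 := by rw [hlen, hl]; simpa using h25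
    have : decide (t.toFinset.card = 25) = false := by simp; omega
    simp [this]
  · rw [if_neg h25]
    by_cases hset : (PySem.Set.ofList l).length ≠ 25
    · rw [if_pos hset]
      have : decide (t.toFinset.card = 25) = false := by
        rw [htf, ← pvOfList_length]; simpa using hset
      simp [this]
    · rw [if_neg hset]
      push Not at hset
      have : decide (t.toFinset.card = 25) = true := by
        rw [htf, ← pvOfList_length]; simpa using hset
      rw [this, Bool.true_and]
      -- both sides are 'every character of l occurs an odd number of times'
      rw [hfold]
      apply Bool.eq_iff_iff.mpr
      simp only [List.all_eq_true, pvAllOdd, PySem.Dict.keys_counter, PySem.Set.mem_ofList,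
        PySem.Dict.getD_counter, pvMod2]
      constructor
      · intro hA x hx
        have := hA x (hperm.mem_iff.mp hx)
        rw [hperm.count_eq] at *
        simp at this ⊢
        omega
      · intro hB x hx
        have := hB x (hperm.mem_iff.mpr hx)
        rw [hperm.count_eq] at this
        simp at this ⊢
        omega
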